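-- pv_equiv track=rewrite | github.com/Simeon-JAA/advent_of_code | 2017/day_1/main.py | get_capatcha_sum_part_2
-- ===== SOURCE A (Python) =====
-- def get_index_to_check(index: int, circle_length: int) -> int:
--     """
--     Return the position(index) of the input we need to check
--     Input is circular and position to check is halfway around the circle
--     """
--     halfway_away = int(circle_length/2)
--     circle_length = circle_length - 1
--
--     new_index = index + halfway_away
--     if new_index <= circle_length:
--         return new_index
--     else:
--         new_index = new_index - circle_length - 1
--         return new_index
--
-- def get_capatcha_sum_part_2(input: str) -> int:
--     """Returns sum of capatcha for part 2"""
--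
--     total = 0
--
--     input_length = len(input)
--
--     for index, num in enumerate(input):
--         index_to_check = get_index_to_check(index, input_length)
--         if input[index_to_check] == num:
--             total += int(num)
--
--     return total
-- ===== SOURCE B (Python) =====
-- def get_capatcha_sum_part_2(input: str) -> int:
--     """Returns sum of capatcha for part 2"""
--     n = len(input)
--     h = n // 2
--     shifted = input[h:] + input[:h]
--     total = 0
--     for c, d in zip(input, shifted):
--         if c == d:
--             total += int(c)
--     return total
-- ===== Notes on version B (the rewrite author's own statement) =====
-- stated objective: idiomatic
-- what changed: B replaces the per-element modular index function (with an explicit indexed lookup into the string) by building the halfway rotation once with two slices and summing over a single zip of the string with its rotation.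
import Mathlib
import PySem

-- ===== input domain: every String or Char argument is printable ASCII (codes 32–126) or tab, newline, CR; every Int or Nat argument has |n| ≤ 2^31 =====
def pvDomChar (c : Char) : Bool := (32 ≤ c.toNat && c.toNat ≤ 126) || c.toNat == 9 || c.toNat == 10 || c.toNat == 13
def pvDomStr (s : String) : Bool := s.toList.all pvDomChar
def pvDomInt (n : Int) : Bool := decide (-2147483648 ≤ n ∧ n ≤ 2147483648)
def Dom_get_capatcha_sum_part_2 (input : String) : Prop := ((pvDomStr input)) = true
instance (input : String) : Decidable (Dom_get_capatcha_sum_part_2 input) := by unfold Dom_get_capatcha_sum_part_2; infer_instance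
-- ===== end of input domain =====

-- B builds the halfway rotation once with two slices and sums over a single zip (idiomatic, same cost).

-- ===== PORT A =====
-- int(circle_length/2): float division then truncation; exact and equal to floor division
-- for the nonnegative lengths this helper is actually called with.
def get_index_to_check (index : Int) (circle_length : Int) : Int :=
  let halfway_away := PySem.Int.floordiv circle_length 2
  let circle_length' := circle_length - 1
  let new_index := index + halfway_away
  if new_index ≤ circle_length' then new_index
  else new_index - circle_length' - 1

def get_capatcha_sum_part_2 (input : String) : Int :=
  let l := input.toList
  let input_length : Int := l.length
  (PySem.List.enumerate l 0).foldl (fun total p =>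
    let index_to_check := get_index_to_check p.1 input_length
    -- input[index_to_check]: always in range here; int(num) raises ValueError on a
    -- matched non-digit, which is exactly what Pre_ excludes (getD 0 is unreachable there)
    match PySem.List.pyGet? l index_to_check with
    | some c => if c == p.2 then total + (PySem.Int.ofStr? (String.mk [p.2])).getD 0 else total
    | none => total) 0

-- ===== PORT B =====
def get_capatcha_sum_part_2_alt (input : String) : Int :=
  let l := input.toList
  let n : Int := l.length
  let h := PySem.Int.floordiv n 2
  let shifted := PySem.List.slice l (some h) none ++ PySem.List.slice l none (some h)
  (l.zip shifted).foldl (fun total p =>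
    -- int(c) raises ValueError on a matched non-digit: excluded by Pre_
    if p.1 == p.2 then total + (PySem.Int.ofStr? (String.mk [p.1])).getD 0 else total) 0

-- ===== PRECONDITION & SPEC =====
-- Pre_ excludes exactly the inputs on which A raises ValueError: some position whose
-- halfway-around neighbour holds the same character, but that character is not a digit
-- (Python's int(num) then raises; B raises there too).
def Pre_get_capatcha_sum_part_2 (input : String) : Prop :=
  ∀ i < input.toList.length,
    input.toList.getD ((i + input.toList.length / 2) % input.toList.length) ' ' = input.toList.getD i ' ' →
    (input.toList.getD i ' ').isDigit = true
instance (input : String) : Decidable (Pre_get_capatcha_sum_part_2 input) := by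
  unfold Pre_get_capatcha_sum_part_2; infer_instance

def pvWitness_get_capatcha_sum_part_2 : String := "1212"

def Spec_get_capatcha_sum_part_2 (input : String) (out : Int) : Prop := out = get_capatcha_sum_part_2_alt input
instance (input : String) (out : Int) : Decidable (Spec_get_capatcha_sum_part_2 input out) := by unfold Spec_get_capatcha_sum_part_2; infer_instance

-- ===== CLAIM (what is proved, stated in full; the proofs are below) =====
def Claim_equal_get_capatcha_sum_part_2 : Prop := ∀ (input : String), Dom_get_capatcha_sum_part_2 input → Pre_get_capatcha_sum_part_2 input → Spec_get_capatcha_sum_part_2 input (get_capatcha_sum_part_2 input)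

-- ===== LEMMAS AND PROOFS =====

lemma shifted_eq (l : List Char) :
    PySem.List.slice l (some (PySem.Int.floordiv l.length 2)) none
      ++ PySem.List.slice l none (some (PySem.Int.floordiv l.length 2))
    = l.drop (l.length / 2) ++ l.take (l.length / 2) := by
  have h2 : (PySem.Int.floordiv l.length 2) = ((l.length / 2 : Nat) : Int) := by
    exact_mod_cast PySem.Int.floordiv_natCast l.length 2
  rw [h2, PySem.List.slice_from_natCast, PySem.List.slice_to_natCast]

lemma index_eq (l : List Char) (k : Nat) (hk : k < l.length) :
    PySem.List.pyGet? l (get_index_to_check ((0 : Int) + k) l.length)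
      = some ((l.drop (l.length / 2) ++ l.take (l.length / 2))[k]'(by simp; omega)) := by
  have h2 : (PySem.Int.floordiv l.length 2) = ((l.length / 2 : Nat) : Int) := by
    exact_mod_cast PySem.Int.floordiv_natCast l.length 2
  have hhn : l.length / 2 ≤ l.length := Nat.div_le_self _ _
  unfold get_index_to_check
  simp only [h2]
  by_cases hc : k + l.length / 2 < l.length
  · rw [if_pos (by push_cast; omega)]
    rw [show (0 : Int) + k + ((l.length / 2 : Nat) : Int) = ((k + l.length / 2 : Nat) : Int) by
      push_cast; ring]
    rw [PySem.List.pyGet?_natCast, List.getElem?_eq_getElem hc]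
    congr 1
    rw [List.getElem_append_left (by simp; omega)]
    simp [Nat.add_comm]
  · rw [if_neg (by push_cast; omega)]
    rw [show (0 : Int) + k + ((l.length / 2 : Nat) : Int) - ((l.length : Int) - 1) - 1
        = ((k + l.length / 2 - l.length : Nat) : Int) by
      push_cast [Nat.cast_sub (by omega : l.length ≤ k + l.length / 2)]; ring]
    rw [PySem.List.pyGet?_natCast, List.getElem?_eq_getElem (by omega)]
    congr 1
    rw [List.getElem_append_right (by simp; omega)]
    simp only [List.getElem_take]
    apply getElem_congr_idx
    simp; omega

lemma maps_eq (l : List Char) :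
    (PySem.List.enumerate l 0).map (fun p =>
        match PySem.List.pyGet? l (get_index_to_check p.1 l.length) with
        | some c => if c == p.2 then (PySem.Int.ofStr? (String.mk [p.2])).getD 0 else 0
        | none => 0)
    = (l.zip (l.drop (l.length / 2) ++ l.take (l.length / 2))).map (fun p =>
        if p.1 == p.2 then (PySem.Int.ofStr? (String.mk [p.1])).getD 0 else 0) := by
  have hlen : (l.drop (l.length / 2) ++ l.take (l.length / 2)).length = l.length := by
    simp; omega
  apply List.ext_getElem
  · simp [PySem.List.length_enumerate, hlen]
  · intro k hk1 hk2
    have hk : k < l.length := by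
      simpa [PySem.List.length_enumerate] using hk1
    simp only [List.getElem_map, PySem.List.getElem_enumerate, List.getElem_zip]
    rw [index_eq l k hk]
    by_cases he : l[k] = (l.drop (l.length / 2) ++ l.take (l.length / 2))[k]'(by omega)
    · simp [← he]
    · have h1 : ((l.drop (l.length / 2) ++ l.take (l.length / 2))[k]'(by omega) == l[k]) = false := by
        rw [beq_eq_false_iff_ne]; exact fun hh => he hh.symm
      have h2 : (l[k] == (l.drop (l.length / 2) ++ l.take (l.length / 2))[k]'(by omega)) = false := by
        rw [beq_eq_false_iff_ne]; exact he
      simp [h1, h2]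

lemma foldlA_eq (l : List Char) :
    (PySem.List.enumerate l 0).foldl (fun total p =>
      match PySem.List.pyGet? l (get_index_to_check p.1 l.length) with
      | some c => if c == p.2 then total + (PySem.Int.ofStr? (String.mk [p.2])).getD 0 else total
      | none => total) 0
    = ((PySem.List.enumerate l 0).map (fun p =>
        match PySem.List.pyGet? l (get_index_to_check p.1 l.length) with
        | some c => if c == p.2 then (PySem.Int.ofStr? (String.mk [p.2])).getD 0 else 0
        | none => 0)).sum := by
  have : (fun (total : Int) (p : Int × Char) =>
      match PySem.List.pyGet? l (get_index_to_check p.1 l.length) with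
      | some c => if c == p.2 then total + (PySem.Int.ofStr? (String.mk [p.2])).getD 0 else total
      | none => total)
    = (fun total p => total + (match PySem.List.pyGet? l (get_index_to_check p.1 l.length) with
        | some c => if c == p.2 then (PySem.Int.ofStr? (String.mk [p.2])).getD 0 else 0
        | none => 0)) := by
    funext t p
    cases PySem.List.pyGet? l (get_index_to_check p.1 l.length) with
    | none => simp
    | some c => by_cases hc : (c == p.2) = true <;> simp [hc]
  rw [this, PySem.List.foldl_add]
  simp

lemma foldlB_eq (l l' : List Char) :
    (l.zip l').foldl (fun total p => if p.1 == p.2 then total + (PySem.Int.ofStr? (String.mk [p.1])).getD 0 else total) 0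
    = ((l.zip l').map (fun p => if p.1 == p.2 then (PySem.Int.ofStr? (String.mk [p.1])).getD 0 else 0)).sum := by
  have : (fun (total : Int) (p : Char × Char) => if p.1 == p.2 then total + (PySem.Int.ofStr? (String.mk [p.1])).getD 0 else total)
      = (fun total p => total + (if p.1 == p.2 then (PySem.Int.ofStr? (String.mk [p.1])).getD 0 else 0)) := by
    funext t p
    by_cases hc : (p.1 == p.2) = true <;> simp [hc]
  rw [this, PySem.List.foldl_add]
  simp

-- ===== VERDICT (by name: the statement is the Claim_ definition above) =====
theorem get_capatcha_sum_part_2_spec : Claim_equal_get_capatcha_sum_part_2 := by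
  intro input _ _
  unfold Spec_get_capatcha_sum_part_2 get_capatcha_sum_part_2 get_capatcha_sum_part_2_alt
  simp only []
  rw [shifted_eq]
  rw [foldlA_eq, maps_eq, foldlB_eq]
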